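-- pv_equiv track=rewrite | github.com/h2r/Task-Scoping | oo_scoping/domain_writers/minecraft_domain_writer.py | underestimate_state_space
-- ===== SOURCE A (Python) =====
-- import operator as op
-- from functools import reduce
--
-- def ncr(n, r):
--     # https://stackoverflow.com/a/4941932
--     r = min(r, n - r)
--     numer = reduce(op.mul, range(n, n - r, -1), 1)
--     denom = reduce(op.mul, range(1, r + 1), 1)
--     return numer // denom  # or / in Python 2
--
-- def underestimate_state_space(
--     x_min, x_max, y_min, y_max, z_min, z_max, n_obsidian_total, item_counts
-- ):
--     """
--     Underestimate state space
--     Sources of underestimation: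
--         When asigning item locations, assume all obsidian blocks are present (easy to correct)
--         Assume that all items that are not present are in the agent's inventory (harder to correct)
--         Assume the agent is alive
--     NOT AN UNDERESTIMATE - ONLY OBSIDIANS CAN MOVE Z, AND ITS BINARY
--     """
--     n_locations = (x_max - x_min + 1) * (y_max - y_min + 1) * (z_max - z_min + 1)
--     obsidian_states = 0
--     # Choose how many obsidians are present
--     for n_obsidian_present in range(n_obsidian_total):
--         # Choose which obsidian are present (unordered)
--         which_obsidian = ncr(n_obsidian_total, n_obsidian_present)
--         # Choose obsidian locations (ordered)
--         obsidian_placements = 1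
--         for i in range(n_obsidian_present):
--             obsidian_placements *= n_locations - i
--         obsidian_states += obsidian_placements * which_obsidian
--
--     # Items
--     item_states = 1
--     # Iterate over item types
--     for this_item_type_total in item_counts:
--         if this_item_type_total == 0:
--             continue
--         # Choose a lower-bound for the locations items can be in by assuming all obsidian is present
--         n_available_locations = n_locations - n_obsidian_total
--         states_this_item_type = 0
--         # Choose how many of these items are present
--         for n_item_present in range(this_item_type_total):
--             # Choose which items are present
--             which_items = ncr(this_item_type_total, n_item_present)
--             item_placements = 1
--             # Choose item locations. Items can be in any location not occupied by a block
--             for i in range(n_item_present):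
--                 # items can be in the same location
--                 item_placements *= n_available_locations
--             states_this_item_type += which_items * item_placements
--         item_states *= states_this_item_type
--
--     agent_states = n_locations
--     total_states = obsidian_states * item_states * agent_states
--     return total_states
-- ===== SOURCE B (Python) =====
-- def underestimate_state_space(
--     x_min, x_max, y_min, y_max, z_min, z_max, n_obsidian_total, item_counts
-- ):
--     n_locations = (x_max - x_min + 1) * (y_max - y_min + 1) * (z_max - z_min + 1)
--
--     # Obsidian: sum_{k < n} C(n, k) * falling(n_locations, k), with the binomial
--     # coefficient and falling factorial maintained incrementally in one pass.
--     obsidian_states = 0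
--     binom = 1
--     falling = 1
--     for k in range(n_obsidian_total):
--         obsidian_states += binom * falling
--         binom = binom * (n_obsidian_total - k) // (k + 1)
--         falling *= n_locations - k
--
--     # Items: sum_{k < t} C(t, k) * L^k = (L+1)^t - L^t by the binomial theorem.
--     L = n_locations - n_obsidian_total
--     item_states = 1
--     for t in item_counts:
--         if t > 0:
--             item_states *= (L + 1) ** t - L ** t
--
--     return obsidian_states * item_states * n_locations
-- ===== Notes on version B (the rewrite author's own statement) =====
-- stated objective: alternative
-- what changed: Obsidian sum maintains the binomial coefficient and falling factorial incrementally in one pass instead of recomputing ncr and the placement product from scratch per term, and each item type's sum of C(t,k)*L^k is replaced by the closed form (L+1)**t - L**t; Pre_ restricts item_counts to nonnegative entries (the natural domain of item counts), where A zeroes the whole product via an empty inner loop.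
-- outside the precondition, e.g. on underestimate_state_space(0, 1, 0, 1, 0, 0, 2, [-1, 2]): A returns 0, B returns 180
import Mathlib
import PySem

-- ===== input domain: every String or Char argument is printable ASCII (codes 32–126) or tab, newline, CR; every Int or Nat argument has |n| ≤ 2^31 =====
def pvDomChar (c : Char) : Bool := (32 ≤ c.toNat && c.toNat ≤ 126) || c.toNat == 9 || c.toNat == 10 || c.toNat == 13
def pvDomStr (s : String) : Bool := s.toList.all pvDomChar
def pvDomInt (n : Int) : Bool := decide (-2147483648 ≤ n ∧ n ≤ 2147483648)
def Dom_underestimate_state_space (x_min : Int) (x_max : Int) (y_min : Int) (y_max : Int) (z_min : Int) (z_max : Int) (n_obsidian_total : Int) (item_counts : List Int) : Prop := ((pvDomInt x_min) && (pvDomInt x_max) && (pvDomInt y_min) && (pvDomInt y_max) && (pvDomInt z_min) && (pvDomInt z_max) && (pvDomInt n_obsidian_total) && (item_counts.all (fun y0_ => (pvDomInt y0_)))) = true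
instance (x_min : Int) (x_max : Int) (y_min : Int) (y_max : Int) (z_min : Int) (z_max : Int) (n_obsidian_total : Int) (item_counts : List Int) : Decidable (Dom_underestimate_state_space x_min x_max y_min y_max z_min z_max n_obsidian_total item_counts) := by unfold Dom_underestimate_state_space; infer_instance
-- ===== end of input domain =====

-- B replaces A's per-term ncr/product recomputation by an incremental one-pass obsidian sum
-- and a closed form (L+1)^t - L^t per item type (an alternative, asymptotically lighter algorithm).


-- ===== PORT A =====
-- ncr(n, r) from A: falling product // factorial, via reduce over ranges
def pvNcr (n r : Int) : Int :=
  let r' := min r (n - r)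
  let numer := (PySem.List.pyRange n (n - r') (-1)).foldl (· * ·) 1
  let denom := (PySem.List.pyRange 1 (r' + 1) 1).foldl (· * ·) 1
  PySem.Int.floordiv numer denom

def underestimate_state_space (x_min : Int) (x_max : Int) (y_min : Int) (y_max : Int) (z_min : Int) (z_max : Int) (n_obsidian_total : Int) (item_counts : List Int) : Int :=
  let n_locations := (x_max - x_min + 1) * (y_max - y_min + 1) * (z_max - z_min + 1)
  let obsidian_states := (PySem.List.pyRange 0 n_obsidian_total 1).foldl
    (fun acc n_obsidian_present =>
      let which_obsidian := pvNcr n_obsidian_total n_obsidian_present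
      let obsidian_placements := (PySem.List.pyRange 0 n_obsidian_present 1).foldl
        (fun p i => p * (n_locations - i)) 1
      acc + obsidian_placements * which_obsidian) 0
  let item_states := item_counts.foldl
    (fun st this_item_type_total =>
      if this_item_type_total = 0 then st
      else
        let n_available_locations := n_locations - n_obsidian_total
        let states_this_item_type := (PySem.List.pyRange 0 this_item_type_total 1).foldl
          (fun acc n_item_present =>
            let which_items := pvNcr this_item_type_total n_item_present
            let item_placements := (PySem.List.pyRange 0 n_item_present 1).foldl
              (fun p _ => p * n_available_locations) 1
            acc + which_items * item_placements) 0
        st * states_this_item_type) 1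
  let agent_states := n_locations
  obsidian_states * item_states * agent_states

-- ===== PORT B =====
def underestimate_state_space_alt (x_min : Int) (x_max : Int) (y_min : Int) (y_max : Int) (z_min : Int) (z_max : Int) (n_obsidian_total : Int) (item_counts : List Int) : Int :=
  let n_locations := (x_max - x_min + 1) * (y_max - y_min + 1) * (z_max - z_min + 1)
  -- state (obsidian_states, binom, falling), updated incrementally
  let s := (PySem.List.pyRange 0 n_obsidian_total 1).foldl
    (fun (s : Int × Int × Int) k =>
      (s.1 + s.2.1 * s.2.2,
       PySem.Int.floordiv (s.2.1 * (n_obsidian_total - k)) (k + 1),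
       s.2.2 * (n_locations - k)))
    (0, 1, 1)
  let obsidian_states := s.1
  let L := n_locations - n_obsidian_total
  let item_states := item_counts.foldl
    (fun st t => if 0 < t then st * ((L + 1) ^ t.toNat - L ^ t.toNat) else st) 1
  obsidian_states * item_states * n_locations

-- ===== PRECONDITION & SPEC =====
-- Pre_ restricts item_counts to nonnegative entries: negative item counts lie outside the
-- natural domain (a count of items), and A's zeroing of the whole product there is an
-- artefact of its empty inner range loop.
def Pre_underestimate_state_space (x_min : Int) (x_max : Int) (y_min : Int) (y_max : Int) (z_min : Int) (z_max : Int) (n_obsidian_total : Int) (item_counts : List Int) : Prop :=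
  ∀ t ∈ item_counts, 0 ≤ t
instance (x_min : Int) (x_max : Int) (y_min : Int) (y_max : Int) (z_min : Int) (z_max : Int) (n_obsidian_total : Int) (item_counts : List Int) : Decidable (Pre_underestimate_state_space x_min x_max y_min y_max z_min z_max n_obsidian_total item_counts) := by unfold Pre_underestimate_state_space; infer_instance

def pvWitness_underestimate_state_space : Int × Int × Int × Int × Int × Int × Int × List Int := (0, 1, 0, 1, 0, 0, 2, [2, 3])

def Spec_underestimate_state_space (x_min : Int) (x_max : Int) (y_min : Int) (y_max : Int) (z_min : Int) (z_max : Int) (n_obsidian_total : Int) (item_counts : List Int) (out : Int) : Prop := out = underestimate_state_space_alt x_min x_max y_min y_max z_min z_max n_obsidian_total item_counts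
instance (x_min : Int) (x_max : Int) (y_min : Int) (y_max : Int) (z_min : Int) (z_max : Int) (n_obsidian_total : Int) (item_counts : List Int) (out : Int) : Decidable (Spec_underestimate_state_space x_min x_max y_min y_max z_min z_max n_obsidian_total item_counts out) := by unfold Spec_underestimate_state_space; infer_instance

-- ===== CLAIM (what is proved, stated in full; the proofs are below) =====
def Claim_equal_underestimate_state_space : Prop := ∀ (x_min : Int) (x_max : Int) (y_min : Int) (y_max : Int) (z_min : Int) (z_max : Int) (n_obsidian_total : Int) (item_counts : List Int), Dom_underestimate_state_space x_min x_max y_min y_max z_min z_max n_obsidian_total item_counts → Pre_underestimate_state_space x_min x_max y_min y_max z_min z_max n_obsidian_total item_counts → Spec_underestimate_state_space x_min x_max y_min y_max z_min z_max n_obsidian_total item_counts (underestimate_state_space x_min x_max y_min y_max z_min z_max n_obsidian_total item_counts)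

-- ===== LEMMAS AND PROOFS =====

-- falling factorial loc * (loc-1) * ... * (loc-k+1) over Int
def pvFall (loc : Int) : Nat → Int
  | 0 => 1
  | k + 1 => pvFall loc k * (loc - k)

-- bridge: a fold over pyRange 0 n 1 is a fold over List.range
lemma pv_foldl_pyRange_zero {α : Type} (n : Nat) (f : α → Int → α) (init : α) :
    (PySem.List.pyRange 0 (n : Int) 1).foldl f init
      = (List.range n).foldl (fun a (k : Nat) => f a (k : Int)) init := by
  simp [PySem.List.pyRange_one, List.foldl_map]

lemma pv_fall_loop (loc : Int) (k : Nat) :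
    (List.range k).foldl (fun p (i : Nat) => p * (loc - (i : Int))) 1 = pvFall loc k := by
  induction k with
  | zero => simp [pvFall]
  | succ k ih => rw [List.range_succ, List.foldl_append, ih]; simp [pvFall]

lemma pv_pow_loop (L : Int) (k : Nat) :
    (List.range k).foldl (fun p (_ : Nat) => p * L) 1 = L ^ k := by
  induction k with
  | zero => simp
  | succ k ih => rw [List.range_succ, List.foldl_append, ih]; simp [pow_succ]

lemma pv_numer (n r : Nat) (h : r ≤ n) :
    ((List.range r).map (fun (j : Nat) => (n : Int) - (j : Int))).foldl (· * ·) 1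
      = (n.descFactorial r : Int) := by
  induction r with
  | zero => simp
  | succ r ih =>
    have hr : r ≤ n := Nat.le_of_succ_le h
    rw [List.range_succ, List.map_append, List.foldl_append, ih hr]
    simp only [List.map_cons, List.map_nil, List.foldl_cons, List.foldl_nil,
      Nat.descFactorial_succ]
    have h1 : (n : Int) - r = ((n - r : Nat) : Int) := by omega
    rw [h1]
    push_cast
    ring

lemma pv_denom (r : Nat) :
    ((List.range r).map (fun (k : Nat) => 1 + (k : Int))).foldl (· * ·) 1
      = (r.factorial : Int) := by
  induction r with
  | zero => simp
  | succ r ih =>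
    rw [List.range_succ, List.map_append, List.foldl_append, ih]
    simp only [List.map_cons, List.map_nil, List.foldl_cons, List.foldl_nil,
      Nat.factorial_succ]
    push_cast
    ring

-- the floordiv core of pvNcr, for a genuine Nat variable r'
lemma pvNcr_core (n r' : Nat) (h : r' ≤ n) :
    PySem.Int.floordiv ((PySem.List.pyRange (n : Int) ((n : Int) - (r' : Int)) (-1)).foldl (· * ·) 1)
        ((PySem.List.pyRange 1 ((r' : Int) + 1) 1).foldl (· * ·) 1)
      = (n.choose r' : Int) := by
  have hnum : PySem.List.pyRange (n : Int) ((n : Int) - (r' : Int)) (-1)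
      = (List.range r').map (fun (j : Nat) => (n : Int) - (j : Int)) := by
    rw [PySem.List.pyRange_neg_one]
    have h2 : ((n : Int) - ((n : Int) - (r' : Int))).toNat = r' := by omega
    rw [h2]
  have hden : PySem.List.pyRange 1 ((r' : Int) + 1) 1
      = (List.range r').map (fun (j : Nat) => 1 + (j : Int)) := by
    rw [PySem.List.pyRange_one]
    have h2 : ((r' : Int) + 1 - 1).toNat = r' := by omega
    rw [h2]
  rw [hnum, hden, pv_numer n r' h, pv_denom r', PySem.Int.floordiv_natCast,
    ← Nat.choose_eq_descFactorial_div_factorial]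

lemma pvNcr_eq (n k : Nat) (hk : k ≤ n) : pvNcr (n : Int) (k : Int) = (n.choose k : Int) := by
  have hmin : min (k : Int) ((n : Int) - k) = ((min k (n - k) : Nat) : Int) := by
    have h1 : (n : Int) - k = ((n - k : Nat) : Int) := by omega
    rw [h1, Nat.cast_min]
  have hr'n : min k (n - k) ≤ n := le_trans (Nat.min_le_left _ _) hk
  simp only [pvNcr, hmin]
  rw [pvNcr_core n (min k (n - k)) hr'n]
  congr 1
  rcases Nat.le_total k (n - k) with h | h
  · rw [Nat.min_eq_left h]
  · rw [Nat.min_eq_right h, Nat.choose_symm hk]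

def pvObsSum (n : Nat) (loc : Int) : Int :=
  ∑ k ∈ Finset.range n, (n.choose k : Int) * pvFall loc k

lemma pv_sum_list (n : Nat) (g : Nat → Int) :
    ((List.range n).map g).sum = ∑ k ∈ Finset.range n, g k := by
  induction n with
  | zero => simp
  | succ n ih => simp [List.range_succ, Finset.sum_range_succ, ih]

lemma pv_obsA (n : Nat) (loc : Int) :
    (List.range n).foldl
      (fun acc (k : Nat) =>
        acc + ((PySem.List.pyRange 0 ((k : Nat) : Int) 1).foldl
                (fun p i => p * (loc - i)) 1) * pvNcr (n : Int) ((k : Nat) : Int)) 0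
      = pvObsSum n loc := by
  rw [PySem.List.foldl_congr_mem
      (g := fun acc (k : Nat) => acc + (n.choose k : Int) * pvFall loc k)]
  · rw [PySem.List.foldl_add]
    rw [pv_sum_list n (fun k => (n.choose k : Int) * pvFall loc k)]
    simp [pvObsSum]
  · intro acc k hk
    have hk' : k ≤ n := le_of_lt (List.mem_range.mp hk)
    rw [pv_foldl_pyRange_zero, pv_fall_loop, pvNcr_eq n k hk']
    ring

lemma pv_binom_step (n j : Nat) (hj : j < n) :
    PySem.Int.floordiv ((n.choose j : Int) * ((n : Int) - (j : Nat))) (((j : Nat) : Int) + 1)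
      = (n.choose (j + 1) : Int) := by
  have h1 : (n : Int) - (j : Nat) = ((n - j : Nat) : Int) := by omega
  rw [h1, ← Nat.cast_mul]
  have h2 : (((j : Nat) : Int) + 1) = ((j + 1 : Nat) : Int) := by push_cast; ring
  rw [h2, PySem.Int.floordiv_natCast]
  congr 1
  rw [← Nat.choose_succ_right_eq]
  exact Nat.mul_div_cancel _ (Nat.succ_pos j)

lemma pv_obsB_inv (n : Nat) (loc : Int) (j : Nat) (hj : j ≤ n) :
    (List.range j).foldl
      (fun (s : Int × Int × Int) (k : Nat) =>
        (s.1 + s.2.1 * s.2.2,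
         PySem.Int.floordiv (s.2.1 * ((n : Int) - (k : Int))) ((k : Int) + 1),
         s.2.2 * (loc - (k : Int))))
      (0, 1, 1)
      = (∑ k ∈ Finset.range j, (n.choose k : Int) * pvFall loc k,
         (n.choose j : Int), pvFall loc j) := by
  induction j with
  | zero => simp [pvFall]
  | succ j ih =>
    have hj' : j < n := hj
    rw [List.range_succ, List.foldl_append, ih (le_of_lt hj')]
    simp only [List.foldl_cons, List.foldl_nil]
    refine Prod.ext ?_ (Prod.ext ?_ ?_)
    · simp [Finset.sum_range_succ]
    · exact pv_binom_step n j hj'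
    · simp [pvFall]

lemma pv_item_inner (L : Int) (t : Nat) :
    (List.range t).foldl
      (fun acc (k : Nat) =>
        acc + pvNcr (t : Int) ((k : Nat) : Int) *
          ((PySem.List.pyRange 0 ((k : Nat) : Int) 1).foldl (fun p _ => p * L) 1)) 0
      = (L + 1) ^ t - L ^ t := by
  rw [PySem.List.foldl_congr_mem (g := fun acc (k : Nat) => acc + (t.choose k : Int) * L ^ k)]
  · rw [PySem.List.foldl_add, pv_sum_list t (fun k => (t.choose k : Int) * L ^ k)]
    have hbin : (L + 1) ^ t = ∑ k ∈ Finset.range (t + 1), (t.choose k : Int) * L ^ k := by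
      rw [add_pow]
      refine Finset.sum_congr rfl ?_
      intro k _
      simp [mul_comm]
    rw [hbin, Finset.sum_range_succ]
    simp
  · intro acc k hk
    have hk' : k ≤ t := le_of_lt (List.mem_range.mp hk)
    rw [pv_foldl_pyRange_zero, pv_pow_loop, pvNcr_eq t k hk']

lemma pv_items_eq (L : Int) (item_counts : List Int) (hnn : ∀ t ∈ item_counts, 0 ≤ t) :
    item_counts.foldl
      (fun st t =>
        if t = 0 then st
        else
          st * ((PySem.List.pyRange 0 t 1).foldl
            (fun acc k =>
              acc + pvNcr t k *
                ((PySem.List.pyRange 0 k 1).foldl (fun p _ => p * L) 1)) 0)) 1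
      = item_counts.foldl
          (fun st t => if 0 < t then st * ((L + 1) ^ t.toNat - L ^ t.toNat) else st) 1 := by
  apply PySem.List.foldl_congr_mem
  intro st t ht
  have h0 : 0 ≤ t := hnn t ht
  rcases eq_or_lt_of_le h0 with h | h
  · simp [← h]
  · rw [if_neg (by omega), if_pos h]
    obtain ⟨m, rfl⟩ := Int.eq_ofNat_of_zero_le h0
    rw [pv_foldl_pyRange_zero, Int.toNat_natCast, pv_item_inner L m]

lemma pv_obs_eq (n loc : Int) :
    (PySem.List.pyRange 0 n 1).foldl
      (fun acc np =>
        acc + ((PySem.List.pyRange 0 np 1).foldl (fun p i => p * (loc - i)) 1) * pvNcr n np) 0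
      = ((PySem.List.pyRange 0 n 1).foldl
          (fun (s : Int × Int × Int) k =>
            (s.1 + s.2.1 * s.2.2,
             PySem.Int.floordiv (s.2.1 * (n - k)) (k + 1),
             s.2.2 * (loc - k)))
          (0, 1, 1)).1 := by
  by_cases h : n ≤ 0
  · rw [PySem.List.pyRange_one_eq_nil h]
    simp
  · obtain ⟨m, rfl⟩ := Int.eq_ofNat_of_zero_le (by omega : (0:Int) ≤ n)
    rw [pv_foldl_pyRange_zero, pv_foldl_pyRange_zero]
    rw [pv_obsA m loc, pv_obsB_inv m loc m le_rfl]
    simp [pvObsSum]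

-- ===== VERDICT (by name: the statement is the Claim_ definition above) =====
theorem underestimate_state_space_spec : Claim_equal_underestimate_state_space := by
  intro x_min x_max y_min y_max z_min z_max n_obsidian_total item_counts _ hpre
  unfold Spec_underestimate_state_space
  simp only [underestimate_state_space, underestimate_state_space_alt]
  rw [pv_obs_eq n_obsidian_total ((x_max - x_min + 1) * (y_max - y_min + 1) * (z_max - z_min + 1))]
  rw [pv_items_eq ((x_max - x_min + 1) * (y_max - y_min + 1) * (z_max - z_min + 1) - n_obsidian_total) item_counts hpre]
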